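-- pv_equiv track=rewrite | github.com/jairofilho79/Grafos | 3ª AV2/bonus.py | func_is_conexo
-- ===== SOURCE A (Python) =====
-- def func_is_conexo(vertices,arestas):
--     conjunto_vertice = []
--
--     for aresta in arestas:
--       for a in aresta:
--         conjunto_vertice.append(a)
--
--     conjunto_vertice = set(conjunto_vertice)
--     for vertice in vertices:
--         if vertice not in conjunto_vertice:
--             return False
--     return True
-- ===== SOURCE B (Python) =====
-- def func_is_conexo(vertices, arestas):
--     # sort-then-merge: two-pointer subset test, no hash set at all
--     ends = sorted([u for e in arestas for u in e])
--     i = 0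
--     for v in sorted(vertices):
--         while i < len(ends) and ends[i] < v:
--             i += 1
--         if i == len(ends) or ends[i] != v:
--             return False
--     return True
-- ===== Notes on version B (the rewrite author's own statement) =====
-- stated objective: alternative
-- what changed: B replaces A's hash-set build + per-vertex membership probes with a sort-then-merge subset test: both the flattened endpoint list and the vertex list are sorted and checked with a single two-pointer scan.
import Mathlib
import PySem

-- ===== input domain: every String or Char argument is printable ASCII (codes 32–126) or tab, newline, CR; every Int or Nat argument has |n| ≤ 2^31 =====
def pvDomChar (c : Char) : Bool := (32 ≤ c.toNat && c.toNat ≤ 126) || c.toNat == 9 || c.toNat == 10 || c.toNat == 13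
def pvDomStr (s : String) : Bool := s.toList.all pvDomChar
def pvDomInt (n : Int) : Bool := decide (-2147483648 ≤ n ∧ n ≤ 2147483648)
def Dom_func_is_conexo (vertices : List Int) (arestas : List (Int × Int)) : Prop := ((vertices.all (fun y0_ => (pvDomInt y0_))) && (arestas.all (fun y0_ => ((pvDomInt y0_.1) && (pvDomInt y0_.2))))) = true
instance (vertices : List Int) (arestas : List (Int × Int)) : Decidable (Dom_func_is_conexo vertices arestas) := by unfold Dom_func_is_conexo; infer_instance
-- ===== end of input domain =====

-- B replaces A's endpoint hash set + per-vertex probes with a sort-then-merge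
-- two-pointer subset test (alternative algorithm; same return value as A).

-- ===== PORT A =====
-- 'for vertice in vertices: if vertice not in conjunto_vertice: return False / return True'
def pvLoopA (s : PySem.Set Int) : List Int → Bool
  | [] => true
  | v :: vs => if ¬ (PySem.Set.contains s v) then false else pvLoopA s vs

def func_is_conexo (vertices : List Int) (arestas : List (Int × Int)) : Bool :=
  -- conjunto_vertice built by appending both endpoints of every edge, then set(...)
  let conjunto_vertice : List Int :=
    arestas.foldl (fun acc aresta => (acc ++ [aresta.1]) ++ [aresta.2]) []
  let conjunto : PySem.Set Int := PySem.Set.ofList conjunto_vertice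
  pvLoopA conjunto vertices

-- ===== PORT B =====
-- the inner 'while i < len(ends) and ends[i] < v: i += 1' (pointer advance = dropping the prefix < v)
def pvAdvanceB (v : Int) : List Int → List Int
  | [] => []
  | e :: es => if e < v then pvAdvanceB v es else e :: es

-- the outer 'for v in sorted(vertices)' loop, carrying the remaining suffix of ends
def pvScanB : List Int → List Int → Bool
  | [], _ => true
  | v :: vs, ends =>
      match pvAdvanceB v ends with
      | [] => false                       -- i == len(ends)
      | e :: es => if e ≠ v then false else pvScanB vs (e :: es)

def func_is_conexo_alt (vertices : List Int) (arestas : List (Int × Int)) : Bool :=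
  let ends : List Int :=
    PySem.List.sorted (arestas.flatMap (fun e => [e.1, e.2])) (fun x => x) false
  pvScanB (PySem.List.sorted vertices (fun x => x) false) ends

-- ===== PRECONDITION & SPEC =====
def Spec_func_is_conexo (vertices : List Int) (arestas : List (Int × Int)) (out : Bool) : Prop := out = func_is_conexo_alt vertices arestas
instance (vertices : List Int) (arestas : List (Int × Int)) (out : Bool) : Decidable (Spec_func_is_conexo vertices arestas out) := by unfold Spec_func_is_conexo; infer_instance

-- ===== CLAIM (what is proved, stated in full; the proofs are below) =====
def Claim_equal_func_is_conexo : Prop := ∀ (vertices : List Int) (arestas : List (Int × Int)), Dom_func_is_conexo vertices arestas → Spec_func_is_conexo vertices arestas (func_is_conexo vertices arestas)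

-- ===== LEMMAS AND PROOFS =====

-- A's vertex loop is an 'all'
lemma pvLoopA_eq_all (s : PySem.Set Int) (vs : List Int) :
    pvLoopA s vs = vs.all (fun v => PySem.Set.contains s v) := by
  induction vs with
  | nil => rfl
  | cons v vs ih => cases h : PySem.Set.contains s v <;> simp [pvLoopA, h, ih]

-- membership in A's endpoint list
lemma mem_foldl_endpoints (es : List (Int × Int)) (acc : List Int) (x : Int) :
    x ∈ es.foldl (fun acc a => (acc ++ [a.1]) ++ [a.2]) acc ↔
      x ∈ acc ∨ ∃ a ∈ es, x = a.1 ∨ x = a.2 := by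
  induction es generalizing acc with
  | nil => simp
  | cons e es ih =>
    simp only [List.foldl_cons, ih, List.mem_append, List.mem_cons]
    aesop

lemma pvAdvanceB_sublist (v : Int) (ends : List Int) :
    (pvAdvanceB v ends).Sublist ends := by
  induction ends with
  | nil => simp [pvAdvanceB]
  | cons e es ih =>
    simp only [pvAdvanceB]
    split
    · exact (ih).cons e
    · exact List.Sublist.refl _

-- for targets ≥ v, advancing past elements < v loses no membership
lemma mem_pvAdvanceB (v w : Int) (hvw : v ≤ w) (ends : List Int) :
    w ∈ pvAdvanceB v ends ↔ w ∈ ends := by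
  induction ends with
  | nil => simp [pvAdvanceB]
  | cons e es ih =>
    simp only [pvAdvanceB]
    split
    · rename_i h
      simp only [ih, List.mem_cons]
      constructor
      · exact Or.inr
      · rintro (rfl | hw)
        · omega
        · exact hw
    · rfl

-- on a sorted ends list, the result of the advance is still sorted and its head is ≥ v
lemma pvAdvanceB_head_ge (v : Int) (ends : List Int) (e : Int) (es : List Int)
    (h : pvAdvanceB v ends = e :: es) : v ≤ e := by
  induction ends with
  | nil => simp [pvAdvanceB] at h
  | cons x xs ih =>
    simp only [pvAdvanceB] at h
    split at h
    · exact ih h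
    · rename_i hx
      cases h
      omega

-- the two-pointer scan on sorted lists is exactly the membership test
lemma pvScanB_eq_all (vs ends : List Int)
    (hvs : vs.Pairwise (fun a b => a ≤ b)) (hends : ends.Pairwise (fun a b => a ≤ b)) :
    pvScanB vs ends = vs.all (fun v => decide (v ∈ ends)) := by
  induction vs generalizing ends with
  | nil => rfl
  | cons v vs ih =>
    have hvs' := (List.pairwise_cons.mp hvs).2
    have hvle := (List.pairwise_cons.mp hvs).1
    simp only [pvScanB]
    have hmem : ∀ w, v ≤ w → (w ∈ pvAdvanceB v ends ↔ w ∈ ends) :=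
      fun w hw => mem_pvAdvanceB v w hw ends
    have hsort : (pvAdvanceB v ends).Pairwise (fun a b => a ≤ b) :=
      List.Pairwise.sublist (pvAdvanceB_sublist v ends) hends
    cases hadv : pvAdvanceB v ends with
    | nil =>
      have : v ∉ ends := by
        rw [← hmem v le_rfl, hadv]; simp
      simp [this]
    | cons e es =>
      have hge : v ≤ e := pvAdvanceB_head_ge v ends e es hadv
      rw [hadv] at hsort
      by_cases hev : e = v
      · subst hev
        have hv : e ∈ ends := by rw [← hmem e le_rfl, hadv]; simp
        have hiff : ∀ w ∈ vs, (w ∈ e :: es ↔ w ∈ ends) := by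
          intro w hw; rw [← hadv]; exact hmem w (hvle w hw)
        show (if e ≠ e then false else pvScanB vs (e :: es)) = _
        rw [if_neg (by simp), ih (e :: es) hvs' hsort, Bool.eq_iff_iff]
        simp only [List.all_eq_true, List.all_cons, Bool.and_eq_true, decide_eq_true_eq, hv,
          decide_true, true_and]
        constructor
        · exact fun h w hw => (hiff w hw).mp (h w hw)
        · exact fun h w hw => (hiff w hw).mpr (h w hw)
      · -- head of the advanced suffix is > v, so v ∉ ends : the scan and the 'all' both fail
        have hgt : v < e := lt_of_le_of_ne hge (fun h => hev h.symm)
        have hvnot : v ∉ ends := by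
          rw [← hmem v le_rfl, hadv]
          intro hc
          rcases List.mem_cons.mp hc with rfl | hc
          · omega
          · have := (List.pairwise_cons.mp hsort).1 v hc
            omega
        simp [hev, hvnot]

-- B in 'all' form
lemma altB_eq_all (vertices : List Int) (arestas : List (Int × Int)) :
    func_is_conexo_alt vertices arestas =
      vertices.all (fun v => decide (∃ a ∈ arestas, v = a.1 ∨ v = a.2)) := by
  unfold func_is_conexo_alt
  rw [pvScanB_eq_all _ _ (PySem.List.sorted_pairwise _ _) (PySem.List.sorted_pairwise _ _),
    Bool.eq_iff_iff]
  simp only [List.all_eq_true, decide_eq_true_eq, PySem.List.mem_sorted, List.mem_flatMap,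
    List.mem_cons, List.not_mem_nil, or_false]

-- ===== VERDICT (by name: the statement is the Claim_ definition above) =====
theorem func_is_conexo_spec : Claim_equal_func_is_conexo := by
  intro vertices arestas _
  unfold Spec_func_is_conexo
  rw [altB_eq_all]
  unfold func_is_conexo
  rw [pvLoopA_eq_all]
  congr 1
  funext v
  rw [Bool.eq_iff_iff]
  simp only [PySem.Set.contains_iff, PySem.Set.mem_ofList, mem_foldl_endpoints,
    decide_eq_true_eq]
  simp
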